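-- pv_equiv track=rewrite | github.com/Quantum-Detectors/pyxspress | src/pyxspress/create_config/modules/proc_serv_gui.py | make_process_dicts
-- ===== SOURCE A (Python) =====
-- process_names = [
--     "OdinServer",
--     "MetaWriter",
--     "ControlServer",
--     "LiveViewMerge",
--     "FrameReceiver",
--     "FrameProcessor",
-- ]
--
-- prefix = "XSP-ODN-"
--
-- def make_process_dicts(num_cards: int) -> list[dict[str, str]]:
--     """Generate process dictionaries
--
--     Args:
--         num_cards (int): Number of cards
--
--     Returns:
--         list[dict[str, str]]: List of process dictionaries containing the
--                               Odin name and generic process name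
--     """
--     processes = []
--
--     # Fixed processes
--     for j in range(4):
--         processes.append(
--             {
--                 "Name": process_names[j],
--                 "Process": f"{prefix}{j + 1:02d}",
--             }
--         )
--
--     # Dynamic processes that depend on number of cards
--     for i in range(num_cards):
--         processes.append(
--             {
--                 "Name": f"{process_names[4]}{i + 1}",
--                 "Process": f"{prefix}{((i + 1) * 2) + 3:02d}",
--             }
--         )
--         processes.append(
--             {
--                 "Name": f"{process_names[5]}{i + 1}",
--                 "Process": f"{prefix}{((i + 1) * 2) + 4:02d}",
--             }
--         )
--     processes.append({"Name": "XSPRESS", "Process": "XSPRESS"})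
--     return processes
-- ===== SOURCE B (Python) =====
-- process_names = [
--     "OdinServer",
--     "MetaWriter",
--     "ControlServer",
--     "LiveViewMerge",
--     "FrameReceiver",
--     "FrameProcessor",
-- ]
--
-- prefix = "XSP-ODN-"
--
-- def make_process_dicts(num_cards: int) -> list[dict[str, str]]:
--     """Generate process dictionaries.
--
--     Builds the Odin-name stream and the running Process-number stream
--     separately and zips them, instead of index arithmetic per entry.
--     """
--     dynamic_names = [
--         f"{name}{card}"
--         for card in range(1, num_cards + 1)
--         for name in process_names[4:6]
--     ]
--     numbers = [f"{prefix}{c:02d}" for c in range(1, len(dynamic_names) + 5)]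
--     processes = [
--         {"Name": name, "Process": number}
--         for name, number in zip(process_names[:4] + dynamic_names, numbers)
--     ]
--     processes.append({"Name": "XSPRESS", "Process": "XSPRESS"})
--     return processes
-- ===== Notes on version B (the rewrite author's own statement) =====
-- stated objective: alternative
-- what changed: B builds the dynamic Odin-name stream and the sequential zero-padded Process-number stream as separate comprehensions and zips them into the dicts, instead of A's single loop appending a pair of dicts per card with closed-form index arithmetic on the card index.
import Mathlib
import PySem

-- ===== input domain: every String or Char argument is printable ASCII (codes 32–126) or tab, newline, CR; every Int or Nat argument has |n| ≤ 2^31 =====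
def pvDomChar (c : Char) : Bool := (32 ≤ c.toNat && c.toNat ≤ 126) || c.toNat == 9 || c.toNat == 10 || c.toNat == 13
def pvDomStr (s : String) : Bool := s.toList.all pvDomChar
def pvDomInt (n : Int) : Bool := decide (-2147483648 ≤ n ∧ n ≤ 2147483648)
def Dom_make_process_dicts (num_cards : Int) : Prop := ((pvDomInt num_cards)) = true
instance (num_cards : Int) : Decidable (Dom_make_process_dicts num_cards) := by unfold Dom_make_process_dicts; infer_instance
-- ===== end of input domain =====

-- B builds the dynamic-name stream and the running Process-number stream as separate
-- comprehensions and zips them, instead of A's per-entry appends with closed-form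
-- index arithmetic (objective: alternative decomposition).

-- shared module constants
def pvProcessNames : List String :=
  ["OdinServer", "MetaWriter", "ControlServer", "LiveViewMerge", "FrameReceiver", "FrameProcessor"]

def pvPrefix : String := "XSP-ODN-"

-- f"{n:02d}" — exact for the nonnegative n both programs apply it to
def pvFmt02 (n : Int) : String :=
  if n < 10 then "0" ++ PySem.Int.toStr n else PySem.Int.toStr n

-- ===== PORT A =====
def make_process_dicts (num_cards : Int) : List (List (String × String)) :=
  let processes : List (List (String × String)) :=
    (PySem.List.pyRange 0 4).foldl
      (fun acc j =>
        acc ++ [[("Name", PySem.List.pyGetD pvProcessNames j ""),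
                 ("Process", pvPrefix ++ pvFmt02 (j + 1))]])
      []
  let processes :=
    (PySem.List.pyRange 0 num_cards).foldl
      (fun acc i =>
        (acc ++ [[("Name", PySem.List.pyGetD pvProcessNames 4 "" ++ PySem.Int.toStr (i + 1)),
                  ("Process", pvPrefix ++ pvFmt02 ((i + 1) * 2 + 3))]])
          ++ [[("Name", PySem.List.pyGetD pvProcessNames 5 "" ++ PySem.Int.toStr (i + 1)),
               ("Process", pvPrefix ++ pvFmt02 ((i + 1) * 2 + 4))]])
      processes
  processes ++ [[("Name", "XSPRESS"), ("Process", "XSPRESS")]]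

-- ===== PORT B =====
def make_process_dicts_alt (num_cards : Int) : List (List (String × String)) :=
  let dynamicNames : List String :=
    (PySem.List.pyRange 1 (num_cards + 1)).flatMap
      (fun card =>
        (PySem.List.slice pvProcessNames (some 4) (some 6)).map
          (fun name => name ++ PySem.Int.toStr card))
  let numbers : List String :=
    (PySem.List.pyRange 1 ((dynamicNames.length : Int) + 5)).map
      (fun c => pvPrefix ++ pvFmt02 c)
  let processes : List (List (String × String)) :=
    ((PySem.List.slice pvProcessNames none (some 4) ++ dynamicNames).zip numbers).map
      (fun p => [("Name", p.1), ("Process", p.2)])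
  processes ++ [[("Name", "XSPRESS"), ("Process", "XSPRESS")]]

-- ===== PRECONDITION & SPEC =====
def Spec_make_process_dicts (num_cards : Int) (out : List (List (String × String))) : Prop := out = make_process_dicts_alt num_cards
instance (num_cards : Int) (out : List (List (String × String))) : Decidable (Spec_make_process_dicts num_cards out) := by unfold Spec_make_process_dicts; infer_instance

-- ===== CLAIM (what is proved, stated in full; the proofs are below) =====
def Claim_equal_make_process_dicts : Prop := ∀ (num_cards : Int), Dom_make_process_dicts num_cards → Spec_make_process_dicts num_cards (make_process_dicts num_cards)

-- ===== LEMMAS AND PROOFS =====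

-- the dynamic-name stream of B holds two names per card
theorem pvDynNamesLen (n : Nat) :
    ((PySem.List.pyRange 1 ((n : Int) + 1)).flatMap
      (fun card =>
        (PySem.List.slice pvProcessNames (some 4) (some 6)).map
          (fun name => name ++ PySem.Int.toStr card))).length = 2 * n := by
  have hsl : PySem.List.slice pvProcessNames (some 4) (some 6)
      = ["FrameReceiver", "FrameProcessor"] := rfl
  rw [hsl]
  simp [List.length_flatMap, PySem.List.length_pyRange_one]
  omega

-- B's zip of the two streams equals A's fixed block followed by A's per-card chunks
theorem pvZipFlat (n : Nat) :
    ((PySem.List.slice pvProcessNames none (some 4) ++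
        (PySem.List.pyRange 1 ((n : Int) + 1)).flatMap
          (fun card => (PySem.List.slice pvProcessNames (some 4) (some 6)).map
            (fun name => name ++ PySem.Int.toStr card))).zip
       ((PySem.List.pyRange 1 (2 * (n : Int) + 5)).map
          (fun c => pvPrefix ++ pvFmt02 c))).map
      (fun p => [("Name", p.1), ("Process", p.2)])
    = (PySem.List.pyRange 0 4).foldl
        (fun acc j => acc ++ [[("Name", PySem.List.pyGetD pvProcessNames j ""),
                               ("Process", pvPrefix ++ pvFmt02 (j + 1))]]) []
      ++ (PySem.List.pyRange 0 (n : Int)).flatMap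
          (fun i => [[("Name", PySem.List.pyGetD pvProcessNames 4 "" ++ PySem.Int.toStr (i + 1)),
                      ("Process", pvPrefix ++ pvFmt02 ((i + 1) * 2 + 3))],
                     [("Name", PySem.List.pyGetD pvProcessNames 5 "" ++ PySem.Int.toStr (i + 1)),
                      ("Process", pvPrefix ++ pvFmt02 ((i + 1) * 2 + 4))]]) := by
  induction n with
  | zero => decide
  | succ k ih =>
    have e1 : ((k + 1 : Nat) : Int) + 1 = ((k : Int) + 1) + 1 := by push_cast; ring
    have h1 : PySem.List.pyRange 1 (((k + 1 : Nat) : Int) + 1)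
        = PySem.List.pyRange 1 ((k : Int) + 1) ++ [(k : Int) + 1] := by
      rw [e1]; exact PySem.List.pyRange_one_succ_right (by omega)
    have e2 : 2 * ((k + 1 : Nat) : Int) + 5 = (2 * (k : Int) + 6) + 1 := by push_cast; ring
    have e3 : (2 * (k : Int) + 6) = (2 * (k : Int) + 5) + 1 := by ring
    have h2 : PySem.List.pyRange 1 (2 * ((k + 1 : Nat) : Int) + 5)
        = PySem.List.pyRange 1 (2 * (k : Int) + 5) ++ [2 * (k : Int) + 5, 2 * (k : Int) + 6] := by
      rw [e2, PySem.List.pyRange_one_succ_right (by omega), e3,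
        PySem.List.pyRange_one_succ_right (by omega)]
      simp [← e3]
    have h3 : PySem.List.pyRange 0 ((k + 1 : Nat) : Int)
        = PySem.List.pyRange 0 (k : Int) ++ [(k : Int)] := by
      have e4 : ((k + 1 : Nat) : Int) = (k : Int) + 1 := by push_cast; ring
      rw [e4]; exact PySem.List.pyRange_one_succ_right (by omega)
    have hsl : PySem.List.slice pvProcessNames (some 4) (some 6)
        = ["FrameReceiver", "FrameProcessor"] := rfl
    have hlen : (PySem.List.slice pvProcessNames none (some 4) ++
        (PySem.List.pyRange 1 ((k : Int) + 1)).flatMap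
          (fun card => (PySem.List.slice pvProcessNames (some 4) (some 6)).map
            (fun name => name ++ PySem.Int.toStr card))).length
        = ((PySem.List.pyRange 1 (2 * (k : Int) + 5)).map
            (fun c => pvPrefix ++ pvFmt02 c)).length := by
      rw [hsl]
      simp [List.length_flatMap, PySem.List.length_pyRange_one, PySem.List.slice,
        pvProcessNames]
      omega
    rw [h1, h2, h3, List.flatMap_append, List.map_append, List.flatMap_append,
      ← List.append_assoc, List.zip_append hlen, List.map_append, ih, List.append_assoc]
    congr 1
    have h4 : ((k : Int) + 1) * 2 + 3 = 2 * (k : Int) + 5 := by ring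
    have h5 : ((k : Int) + 1) * 2 + 4 = 2 * (k : Int) + 6 := by ring
    simp only [hsl, List.flatMap_cons, List.flatMap_nil, List.map_cons, List.map_nil,
      List.zip_cons_cons, List.zip_nil_right, List.append_nil]
    rw [h4, h5]
    rfl

-- A's append-two-dicts loop is the flatMap of its per-card chunks
theorem pvAFoldFlat (l : List Int) (init : List (List (String × String))) :
    l.foldl
      (fun acc i =>
        (acc ++ [[("Name", PySem.List.pyGetD pvProcessNames 4 "" ++ PySem.Int.toStr (i + 1)),
                  ("Process", pvPrefix ++ pvFmt02 ((i + 1) * 2 + 3))]])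
          ++ [[("Name", PySem.List.pyGetD pvProcessNames 5 "" ++ PySem.Int.toStr (i + 1)),
               ("Process", pvPrefix ++ pvFmt02 ((i + 1) * 2 + 4))]]) init
    = init ++ l.flatMap
        (fun i => [[("Name", PySem.List.pyGetD pvProcessNames 4 "" ++ PySem.Int.toStr (i + 1)),
                    ("Process", pvPrefix ++ pvFmt02 ((i + 1) * 2 + 3))],
                   [("Name", PySem.List.pyGetD pvProcessNames 5 "" ++ PySem.Int.toStr (i + 1)),
                    ("Process", pvPrefix ++ pvFmt02 ((i + 1) * 2 + 4))]]) := by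
  have hfun : (fun (acc : List (List (String × String))) (i : Int) =>
      (acc ++ [[("Name", PySem.List.pyGetD pvProcessNames 4 "" ++ PySem.Int.toStr (i + 1)),
                ("Process", pvPrefix ++ pvFmt02 ((i + 1) * 2 + 3))]])
        ++ [[("Name", PySem.List.pyGetD pvProcessNames 5 "" ++ PySem.Int.toStr (i + 1)),
             ("Process", pvPrefix ++ pvFmt02 ((i + 1) * 2 + 4))]])
      = fun acc i => acc ++
          [[("Name", PySem.List.pyGetD pvProcessNames 4 "" ++ PySem.Int.toStr (i + 1)),
            ("Process", pvPrefix ++ pvFmt02 ((i + 1) * 2 + 3))],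
           [("Name", PySem.List.pyGetD pvProcessNames 5 "" ++ PySem.Int.toStr (i + 1)),
            ("Process", pvPrefix ++ pvFmt02 ((i + 1) * 2 + 4))]] := by
    funext acc i; simp
  rw [hfun, PySem.List.foldl_append_eq_flatMap]

-- ===== VERDICT (by name: the statement is the Claim_ definition above) =====
theorem make_process_dicts_spec : Claim_equal_make_process_dicts := by
  intro num_cards _
  unfold Spec_make_process_dicts make_process_dicts make_process_dicts_alt
  cases num_cards with
  | ofNat n =>
    simp only [Int.ofNat_eq_natCast]
    rw [pvAFoldFlat, pvDynNamesLen n]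
    have e : ((2 * n : Nat) : Int) + 5 = 2 * (n : Int) + 5 := by push_cast; ring
    rw [e, pvZipFlat n]
  | negSucc m =>
    have hA : PySem.List.pyRange 0 (Int.negSucc m) = [] :=
      PySem.List.pyRange_one_eq_nil (by omega)
    have hB : PySem.List.pyRange 1 (Int.negSucc m + 1) = [] :=
      PySem.List.pyRange_one_eq_nil (by omega)
    rw [hA, hB]
    decide
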